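-- pv_equiv track=rewrite | github.com/rittwickBhabak/OwnWiki | renderer.py | block_2_sanitized_block
-- ===== SOURCE A (Python) =====
-- def block_2_sanitized_block(block):
--     '''Remove unnecessary line breaks b/w the lines.
--
--     Arguments:
--         block: A string having unnecessary line breaks.
--
--     Returns:
--         None
--
--     '''
--
--     lines = block.split('\n')
--     to_delete = False
--     for line_num, line in enumerate(lines):
--         if to_delete:
--             lines[line_num] = 'THIS_LINE_TO_BE_DELETED'
--             to_delete = False
--         elif line_num+1<len(lines) and line.startswith('* ') and not lines[line_num+1].startswith('* ') and not lines[line_num+1].startswith('# ') and not lines[line_num+1].startswith('## '):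
--             lines[line_num] = lines[line_num] + ' ' + lines[line_num+1]
--             to_delete = True
--
--     lines = list(filter(lambda x: x!='THIS_LINE_TO_BE_DELETED', lines))
--
--     for line_num in range(len(lines)-1, 0, -1):
--         next = lines[line_num-1]
--         current = lines[line_num]
--         l1 = ['* ', '# ']
--         l2 = ['## ']
--
--         if current.strip()!='' and next.strip()!='' and (current[:2] not in l1) and (current[:3] not in l2) and (next[:2] not in l1) and (next[:3] not in l2):
--             lines[line_num-1 ] = lines[line_num-1] + ' ' + lines[line_num]
--             lines[line_num] = 'THIS_LINE_TO_BE_DELETED'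
--
--     lines = list(filter(lambda x: x!='THIS_LINE_TO_BE_DELETED', lines))
--
--     return '\n'.join(lines)
-- ===== SOURCE B (Python) =====
-- def block_2_sanitized_block(block):
--     '''Remove unnecessary line breaks b/w the lines.
--
--     Single backward pass fusing both merge rules: a '* '-line merge is decided
--     purely locally (a merge head starts with '* ' while an absorbed line never
--     does, so merge pairs are disjoint and need no left-to-right sweep), and the
--     plain-line run merging is exactly a right-to-left accumulation, so one scan
--     from the last line to the first does everything with no sentinel filtering.
--     '''
--     lines = block.split('\n')
--
--     def plain(s):
--         return s.strip() != '' and s[:2] not in ('* ', '# ') and s[:3] != '## '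
--
--     out = []  # chunks of the processed suffix, most recent (leftmost) last
--     i = len(lines) - 1
--     while i >= 0:
--         s = lines[i]
--         if i > 0 and lines[i - 1].startswith('* ') and not s.startswith(('* ', '# ', '## ')):
--             # s is absorbed by the '* ' line above it; the merged line starts
--             # with '* ', hence is never plain and never joins a run
--             out.append(lines[i - 1] + ' ' + s)
--             i -= 2
--         elif plain(s) and out and plain(out[-1]):
--             out[-1] = s + ' ' + out[-1]
--             i -= 1
--         else:
--             out.append(s)
--             i -= 1
--     return '\n'.join(reversed(out))
-- ===== Notes on version B (the rewrite author's own statement) =====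
-- stated objective: alternative
-- what changed: A's two forward sentinel-marking passes (mark merged lines 'THIS_LINE_TO_BE_DELETED', filter twice) are replaced by ONE backward scan that fuses both rules, justified by the observation that a '* '-merge head can never itself be absorbed, so pair merges are local and need no forward sweep; the plain-line run merging is exactly a right-to-left accumulation into the newest chunk.
-- intended difference: On blocks containing a line that literally equals 'THIS_LINE_TO_BE_DELETED' and is not preceded by a '* ' line, A's filter silently deletes that line (it collides with A's internal sentinel), while B keeps it and treats it as ordinary text, which is the intended behaviour. — e.g. on block_2_sanitized_block("THIS_LINE_TO_BE_DELETED"): A returns "", B returns "THIS_LINE_TO_BE_DELETED"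
import Mathlib
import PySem

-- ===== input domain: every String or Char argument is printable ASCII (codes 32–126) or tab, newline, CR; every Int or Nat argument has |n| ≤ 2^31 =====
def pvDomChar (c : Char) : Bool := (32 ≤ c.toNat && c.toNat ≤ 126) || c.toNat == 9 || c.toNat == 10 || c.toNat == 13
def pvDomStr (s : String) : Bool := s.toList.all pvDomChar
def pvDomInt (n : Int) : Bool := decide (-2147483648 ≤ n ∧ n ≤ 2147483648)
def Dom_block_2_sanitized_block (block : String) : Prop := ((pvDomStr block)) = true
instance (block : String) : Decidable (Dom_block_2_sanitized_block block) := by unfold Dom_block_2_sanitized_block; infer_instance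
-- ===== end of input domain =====

-- B replaces A's two forward sentinel-marking passes by ONE backward scan fusing both merge rules
-- ('* '-pair merges are local and disjoint, so no forward sweep is needed); alternative decomposition,
-- same cost. B differs intentionally where an input line literally equals A's internal sentinel (see D_).

-- shared pure predicates (the very conditions both Python versions test, verbatim)
-- Python: prev.startswith('* ') and not s.startswith('* ') and not s.startswith('# ') and not s.startswith('## ')
def pvMergeCond (x y : String) : Bool :=
  PySem.Str.startswith x "* " && !PySem.Str.startswith y "* " &&
    !PySem.Str.startswith y "# " && !PySem.Str.startswith y "## "

-- Python: s.strip()!='' and (s[:2] not in ['* ', '# ']) and (s[:3] not in ['## '])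
def pvPlain (s : String) : Bool :=
  PySem.Str.strip s != "" &&
    !(["* ", "# "].contains (PySem.Str.slice s none (some 2))) &&
    !(["## "].contains (PySem.Str.slice s none (some 3)))

-- ===== PORT A =====
def pvSent : String := "THIS_LINE_TO_BE_DELETED"

-- one iteration of A's first loop (for line_num, line in enumerate(lines), mutating lines in place)
def pvStep1 (n : Nat) (st : List String × Bool) (i : Nat) : List String × Bool :=
  let line := st.1.getD i ""
  if st.2 then (st.1.set i pvSent, false)
  else if decide (i + 1 < n) && pvMergeCond line (st.1.getD (i + 1) "") then
    (st.1.set i (line ++ " " ++ st.1.getD (i + 1) ""), true)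
  else (st.1, false)

-- one iteration of A's second loop (for line_num in range(len(lines)-1, 0, -1))
def pvStep2 (ls : List String) (j : Int) : List String :=
  let next := PySem.List.pyGetD ls (j - 1) ""
  let current := PySem.List.pyGetD ls j ""
  if pvPlain current && pvPlain next then
    PySem.List.pySetD (PySem.List.pySetD ls (j - 1) (next ++ " " ++ current)) j pvSent
  else ls

def block_2_sanitized_block (block : String) : String :=
  let lines := (PySem.Str.split? block "\n").getD []     -- block.split('\n'); '\n' ≠ '' so never none
  let lines := ((List.range lines.length).foldl (pvStep1 lines.length) (lines, false)).1
  let lines := lines.filter (fun x => x != pvSent)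
  let lines := (PySem.List.pyRange ((lines.length : Int) - 1) 0 (-1)).foldl pvStep2 lines
  let lines := lines.filter (fun x => x != pvSent)
  PySem.Str.join "\n" lines

-- ===== PORT B =====
-- the elif/else pair of Source B's loop body: merge s into the chunk just to its right if both are
-- plain, else start a new chunk.  Source B's 'out' (appended at the end, reversed for the join) is
-- kept here as a cons-list with the most recent (= leftmost) chunk first, so no final reverse.
def pvStep2B (out : List String) (s : String) : List String :=
  match out with
  | h :: t => if pvPlain s && pvPlain h then (s ++ " " ++ h) :: t else s :: h :: t
  | [] => [s]

-- Source B's single backward while-loop: state i+1 processes index i (0 ≤ i < |lines| throughout,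
-- so plain getD is Python's lines[i]); the '* '-absorption branch consumes two lines at once.
-- Python's `i > 0 and …` guard appears as the separate state-1 equation (index 0 has no line above).
def pvFusedGo (lines : List String) : Nat → List String → List String
  | 0, out => out
  | 1, out => pvStep2B out (lines.getD 0 "")
  | (j+2), out =>
      let s := lines.getD (j+1) ""
      if pvMergeCond (lines.getD j "") s then
        pvFusedGo lines j ((lines.getD j "" ++ " " ++ s) :: out)
      else
        pvFusedGo lines (j+1) (pvStep2B out s)

def block_2_sanitized_block_alt (block : String) : String :=
  let lines := (PySem.Str.split? block "\n").getD []
  PySem.Str.join "\n" (pvFusedGo lines lines.length [])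

-- ===== PRECONDITION & SPEC =====
-- On blocks containing a line that literally equals 'THIS_LINE_TO_BE_DELETED' and is not preceded by a
-- '* ' line, A's filter silently deletes that line (it collides with A's internal sentinel), while B
-- keeps it and treats it as ordinary text, which is the intended behaviour.
def D_block_2_sanitized_block (block : String) : Prop :=
  ((PySem.Str.split? block "\n").getD []).head? = some "THIS_LINE_TO_BE_DELETED" ∨
    ∃ p ∈ ((PySem.Str.split? block "\n").getD []).zip ((PySem.Str.split? block "\n").getD []).tail,
      p.2 = "THIS_LINE_TO_BE_DELETED" ∧ PySem.Str.startswith p.1 "* " = false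
instance (block : String) : Decidable (D_block_2_sanitized_block block) := by
  unfold D_block_2_sanitized_block; infer_instance

def Spec_block_2_sanitized_block (block : String) (out : String) : Prop :=
  ¬ D_block_2_sanitized_block block → out = block_2_sanitized_block_alt block
instance (block : String) (out : String) : Decidable (Spec_block_2_sanitized_block block out) := by
  unfold Spec_block_2_sanitized_block; infer_instance

def pvDiffWitness_block_2_sanitized_block : String := "THIS_LINE_TO_BE_DELETED"
def pvDiffWitnessOut_block_2_sanitized_block : String × String := ("", "THIS_LINE_TO_BE_DELETED")

-- ===== CLAIM (what is proved, stated in full; the proofs are below) =====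
def Claim_unchanged_block_2_sanitized_block : Prop :=
  ∀ (block : String), Dom_block_2_sanitized_block block →
    Spec_block_2_sanitized_block block (block_2_sanitized_block block)
def Claim_changed_block_2_sanitized_block : Prop :=
  Dom_block_2_sanitized_block (pvDiffWitness_block_2_sanitized_block) ∧
  D_block_2_sanitized_block (pvDiffWitness_block_2_sanitized_block) ∧
  block_2_sanitized_block (pvDiffWitness_block_2_sanitized_block) = pvDiffWitnessOut_block_2_sanitized_block.1 ∧
  block_2_sanitized_block_alt (pvDiffWitness_block_2_sanitized_block) = pvDiffWitnessOut_block_2_sanitized_block.2 ∧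
  pvDiffWitnessOut_block_2_sanitized_block.1 ≠ pvDiffWitnessOut_block_2_sanitized_block.2
def Claim_exact_block_2_sanitized_block : Prop :=
  ∀ (block : String), Dom_block_2_sanitized_block block → D_block_2_sanitized_block block →
    block_2_sanitized_block block ≠ block_2_sanitized_block_alt block

-- ===== LEMMAS AND PROOFS =====

-- a line produced by gluing two lines with ' ' can never equal the sentinel (which has no space)
lemma pvGlue_ne_sent (x y : String) : x ++ " " ++ y ≠ pvSent := by
  intro h
  have hs : ' ' ∈ pvSent.toList := by
    rw [← h]; simp
  revert hs; decide

-- the list-level shape of D_ (on the split lines)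
def pvDL (l : List String) : Prop :=
  l.head? = some pvSent ∨
    ∃ p ∈ l.zip l.tail, p.2 = pvSent ∧ PySem.Str.startswith p.1 "* " = false

-- pure recursion computing the state of A's first loop on the unprocessed suffix
def pvFA : Bool → List String → List String
  | _, [] => []
  | true, _ :: t => pvSent :: pvFA false t
  | false, x :: t =>
      match t with
      | [] => [x]
      | y :: _ => if pvMergeCond x y then (x ++ " " ++ y) :: pvFA true t else x :: pvFA false t

-- reference form of A's first pass used by the proofs: pair up each '* ' line with its continuation
def pvPass1Go (x : String) : List String → List String
  | [] => [x]
  | y :: t =>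
      if pvMergeCond x y then
        match t with
        | [] => [x ++ " " ++ y]
        | z :: t' => (x ++ " " ++ y) :: pvPass1Go z t'
      else x :: pvPass1Go y t

def pvPass1B : List String → List String
  | [] => []
  | x :: t => pvPass1Go x t

lemma pvGetDMid (pre t : List String) (x d : String) : (pre ++ x :: t).getD pre.length d = x := by
  simp

lemma pvGetDMid1 (pre t : List String) (x d : String) :
    (pre ++ x :: t).getD (pre.length + 1) d = t.getD 0 d := by
  simp [List.getD, List.getElem?_append_right (by omega : pre.length ≤ pre.length + 1)]

lemma pvSetMid (pre t : List String) (x v : String) :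
    (pre ++ x :: t).set pre.length v = pre ++ v :: t := by
  simp

lemma pvP1a (suf pre : List String) (d : Bool) (n : Nat) (hn : n = pre.length + suf.length) :
    ((List.range' pre.length suf.length).foldl (pvStep1 n) (pre ++ suf, d)).1 = pre ++ pvFA d suf := by
  induction suf generalizing pre d n with
  | nil => simp [pvFA]
  | cons x t ih =>
    simp only [List.length_cons, List.range'_succ, List.foldl_cons]
    cases d with
    | true =>
      have hs : pvStep1 n (pre ++ x :: t, true) pre.length = (pre ++ pvSent :: t, false) := by
        simp [pvStep1]
      rw [hs]
      have := ih (pre := pre ++ [pvSent]) (d := false) (n := n) (by simp at hn ⊢; omega)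
      simp only [List.length_append, List.length_cons, List.length_nil, List.append_assoc,
        List.cons_append, List.nil_append] at this ⊢
      rw [show pre.length + 1 = pre.length + (1 + 0) by omega] at this
      simpa [pvFA] using this
    | false =>
      cases t with
      | nil =>
        have hs : pvStep1 n (pre ++ [x], false) pre.length = (pre ++ [x], false) := by
          have : ¬ (pre.length + 1 < n) := by simp at hn; omega
          simp [pvStep1, this]
        rw [hs]
        simp [pvFA]
      | cons y t' =>
        have hlt : pre.length + 1 < n := by simp at hn; omega
        by_cases hc : pvMergeCond x y = true
        · have hs : pvStep1 n (pre ++ x :: y :: t', false) pre.length =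
              (pre ++ (x ++ " " ++ y) :: y :: t', true) := by
            simp [pvStep1, hlt, hc]
          rw [hs]
          have := ih (pre := pre ++ [x ++ " " ++ y]) (d := true) (n := n) (by simp at hn ⊢; omega)
          simp only [List.length_append, List.length_cons, List.length_nil, List.append_assoc,
            List.cons_append, List.nil_append] at this ⊢
          rw [show pre.length + 1 = pre.length + (1 + 0) by omega] at this
          simp only [this]
          simp [pvFA, hc]
        · have hs : pvStep1 n (pre ++ x :: y :: t', false) pre.length =
              (pre ++ x :: y :: t', false) := by
            simp [pvStep1, hc]
          rw [hs]
          have := ih (pre := pre ++ [x]) (d := false) (n := n) (by simp at hn ⊢; omega)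
          simp only [List.length_append, List.length_cons, List.length_nil, List.append_assoc,
            List.cons_append, List.nil_append] at this ⊢
          rw [show pre.length + 1 = pre.length + (1 + 0) by omega] at this
          simp only [this]
          simp [pvFA, hc]

lemma pvDL_head_intro (x : String) (t : List String) (hx : x = pvSent) : pvDL (x :: t) := by
  left; simp [hx]

lemma pvDL_pair_intro (x y : String) (t : List String) (hy : y = pvSent)
    (hx : PySem.Str.startswith x "* " = false) : pvDL (x :: y :: t) := by
  right; exact ⟨(x, y), by simp [List.zip_cons_cons], hy, hx⟩

lemma pvZip_lift (y : String) (t : List String) (p : String × String) (hp : p ∈ t.zip t.tail) :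
    p ∈ (y :: t).zip t := by
  cases t with
  | nil => simp at hp
  | cons z t' =>
    simp only [List.tail_cons, List.zip_cons_cons, List.mem_cons] at hp ⊢
    tauto

lemma pvDL_pair_mem (x : String) (t : List String) (p : String × String) (hp : p ∈ t.zip t.tail)
    (h2 : p.2 = pvSent ∧ PySem.Str.startswith p.1 "* " = false) : pvDL (x :: t) := by
  right
  exact ⟨p, by simpa using pvZip_lift x t p hp, h2.1, h2.2⟩

lemma pvDL_shift (x : String) (t : List String) (hhead : t.head? ≠ some pvSent) (h : pvDL t) :
    pvDL (x :: t) := by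
  rcases h with hh | ⟨p, hp, h2⟩
  · exact absurd hh hhead
  · cases t with
    | nil => simp at hp
    | cons y t' =>
      right
      exact ⟨p, by simp only [List.zip_cons_cons, List.tail_cons, List.mem_cons] at hp ⊢; tauto, h2⟩

lemma pvSw_sent : PySem.Str.startswith pvSent "* " = false ∧
    PySem.Str.startswith pvSent "# " = false ∧ PySem.Str.startswith pvSent "## " = false := by
  decide

lemma pvGo_merge (x y : String) (t : List String) (hc : pvMergeCond x y = true) :
    pvPass1Go x (y :: t) = (x ++ " " ++ y) :: pvPass1B t := by
  cases t <;> simp [pvPass1Go, pvPass1B, hc]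

lemma pvGo_nomerge (x y : String) (t : List String) (hc : ¬ pvMergeCond x y = true) :
    pvPass1Go x (y :: t) = x :: pvPass1Go y t := by
  cases t <;> simp [pvPass1Go, hc]

lemma pvFA_cons2 (x y : String) (t : List String) :
    pvFA false (x :: y :: t) =
      if pvMergeCond x y then (x ++ " " ++ y) :: pvFA true (y :: t) else x :: pvFA false (y :: t) := rfl

lemma pvFA_true (x : String) (t : List String) : pvFA true (x :: t) = pvSent :: pvFA false t := rfl

lemma pvP1b (l : List String) (h : ¬ pvDL l) :
    (pvFA false l).filter (fun x => x != pvSent) = pvPass1B l := by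
  generalize hn : l.length = n
  induction n using Nat.strong_induction_on generalizing l with
  | _ n ih =>
  cases l with
  | nil => rfl
  | cons x t =>
    have hx : x ≠ pvSent := fun hx => h (pvDL_head_intro x t hx)
    cases t with
    | nil => simp [pvFA, pvPass1B, pvPass1Go, hx]
    | cons y t' =>
      by_cases hc : pvMergeCond x y = true
      · -- merge: fA = merged :: pvSent :: fA false t'
        have hswy : PySem.Str.startswith y "* " = false := by
          simp only [pvMergeCond, Bool.and_eq_true, Bool.not_eq_true'] at hc
          exact hc.1.1.2
        have ht' : ¬ pvDL t' := by
          intro hd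
          apply h
          rcases hd with hh | ⟨p, hp, h2⟩
          · cases t' with
            | nil => simp at hh
            | cons z t'' =>
              simp only [List.head?_cons, Option.some.injEq] at hh
              exact pvDL_pair_mem x _ (y, z)
                (by rw [List.tail_cons, List.zip_cons_cons]; exact List.mem_cons_self ..) ⟨hh, hswy⟩
          · exact pvDL_pair_mem x _ p (pvZip_lift y t' p hp) ⟨h2.1, h2.2⟩
        have hrec := ih (t'.length) (by simp only [List.length_cons] at hn; omega) t' ht' rfl
        rw [pvFA_cons2, if_pos hc, pvFA_true]
        rw [pvPass1B, pvGo_merge x y t' hc]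
        simp only [List.filter_cons]
        have h1 : ((x ++ " " ++ y) != pvSent) = true := by
          simp [pvGlue_ne_sent x y]
        simp [h1, hrec]
      · -- no merge
        have hy : y ≠ pvSent := by
          intro hy
          have hmc : pvMergeCond x pvSent = PySem.Str.startswith x "* " := by
            simp only [pvMergeCond, pvSw_sent.1, pvSw_sent.2.1, pvSw_sent.2.2,
              Bool.not_false, Bool.and_true]
          rw [hy, hmc] at hc
          exact h (pvDL_pair_intro x y t' hy (Bool.not_eq_true _ ▸ eq_false_of_ne_true hc))
        have hyt : ¬ pvDL (y :: t') := by
          intro hd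
          exact h (pvDL_shift x _ (by simpa using hy) hd)
        have hrec := ih ((y :: t').length) (by simp only [List.length_cons] at hn ⊢; omega) (y :: t') hyt rfl
        rw [pvFA_cons2, if_neg hc]
        rw [pvPass1B, pvGo_nomerge x y t' hc]
        simp only [List.filter_cons]
        have h1 : (x != pvSent) = true := by simp [hx]
        simp only [h1, if_true]
        rw [hrec, pvPass1B]

-- pass-2 bridge: folding pvStep2B from a longer accumulator only rides on its head
lemma pvFoldTail (xs : List String) (h : String) (r : List String) :
    xs.foldl pvStep2B (h :: r) = xs.foldl pvStep2B [h] ++ r := by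
  induction xs generalizing h r with
  | nil => simp
  | cons x xs ih =>
    simp only [List.foldl_cons, pvStep2B]
    by_cases hc : (pvPlain x && pvPlain h) = true
    · rw [if_pos hc, if_pos hc]
      exact ih _ _
    · rw [if_neg hc, if_neg hc, ih x (h :: r), ih x [h], List.append_assoc]
      simp

set_option maxHeartbeats 1000000 in
lemma pvP2a (j : Nat) (pre : List String) (c : String) (T : List String)
    (hc : c ≠ pvSent) (hpre : ∀ x ∈ pre, x ≠ pvSent) (hj : pre.length = j) :
    ((PySem.List.pyRange (j : Int) 0 (-1)).foldl pvStep2 (pre ++ c :: T)).filter (fun x => x != pvSent)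
      = ((pre ++ [c]).reverse).foldl pvStep2B [] ++ T.filter (fun x => x != pvSent) := by
  induction j generalizing pre c T with
  | zero =>
    have hpre0 : pre = [] := List.eq_nil_of_length_eq_zero hj
    subst hpre0
    rw [PySem.List.pyRange_neg_one_eq_nil (by norm_num)]
    simp [pvStep2B, hc]
  | succ j ih =>
    rcases pre.eq_nil_or_concat with rfl | ⟨pre', p, rfl⟩
    · simp at hj
    simp only [List.concat_eq_append] at hj hpre ⊢
    have hj' : pre'.length = j := by simp at hj; omega
    subst hj'
    rw [PySem.List.pyRange_neg_one_cons (by exact_mod_cast Nat.succ_pos pre'.length)]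
    have hcast : ((pre'.length + 1 : Nat) : Int) - 1 = (pre'.length : Int) := by push_cast; ring
    rw [hcast]
    simp only [List.foldl_cons]
    have hL : (pre' ++ [p]) ++ c :: T = pre' ++ p :: c :: T := by simp
    rw [hL]
    have hnext : PySem.List.pyGetD (pre' ++ p :: c :: T) ((pre'.length : Nat) : Int) "" = p := by
      rw [PySem.List.pyGetD_natCast, pvGetDMid]
    have hcur : PySem.List.pyGetD (pre' ++ p :: c :: T) ((pre'.length + 1 : Nat) : Int) "" = c := by
      rw [PySem.List.pyGetD_natCast]
      exact pvGetDMid1 pre' (c :: T) p ""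
    by_cases hcnd : (pvPlain c && pvPlain p) = true
    · have hstep : pvStep2 (pre' ++ p :: c :: T) ((pre'.length + 1 : Nat) : Int)
          = pre' ++ (p ++ " " ++ c) :: pvSent :: T := by
        rw [pvStep2]
        simp only [hcast, PySem.List.pySetD_natCast]
        simp only [hnext, hcur, hcnd, if_true]
        rw [pvSetMid]
        rw [show pre' ++ (p ++ " " ++ c) :: c :: T = (pre' ++ [p ++ " " ++ c]) ++ c :: T by simp]
        rw [show pre'.length + 1 = (pre' ++ [p ++ " " ++ c]).length by simp]
        rw [pvSetMid]
        simp
      rw [hstep]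
      rw [ih pre' (p ++ " " ++ c) (pvSent :: T) (pvGlue_ne_sent p c)
        (fun x hx => hpre x (List.mem_append_left _ hx)) rfl]
      have hfs : (pvSent :: T).filter (fun x => x != pvSent) = T.filter (fun x => x != pvSent) := by
        simp
      rw [hfs]
      congr 1
      have hone : (pvPlain p && pvPlain c) = true := by
        rw [Bool.and_comm]; exact hcnd
      have e1 : ((pre' ++ [p ++ " " ++ c]).reverse) = (p ++ " " ++ c) :: pre'.reverse := by simp
      have e2 : ((pre' ++ [p] ++ [c]).reverse) = c :: p :: pre'.reverse := by simp
      rw [e1, e2]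
      simp only [List.foldl_cons]
      have e3 : pvStep2B (pvStep2B [] c) p = pvStep2B [] (p ++ " " ++ c) := by
        simp only [pvStep2B]
        rw [if_pos hone]
      rw [e3]
    · have hstep : pvStep2 (pre' ++ p :: c :: T) ((pre'.length + 1 : Nat) : Int)
          = pre' ++ p :: c :: T := by
        rw [pvStep2]
        simp only [hcast, PySem.List.pySetD_natCast]
        simp only [hnext, hcur]
        rw [if_neg hcnd]
      rw [hstep]
      have hp : p ≠ pvSent := hpre p (by simp)
      rw [ih pre' p (c :: T) hp (fun x hx => hpre x (List.mem_append_left _ hx)) rfl]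
      have hfc : (c :: T).filter (fun x => x != pvSent)
          = c :: T.filter (fun x => x != pvSent) := by simp [hc]
      rw [hfc]
      have hone : ¬ (pvPlain p && pvPlain c) = true := by
        rw [Bool.and_comm]; exact hcnd
      have e1 : ((pre' ++ [p]).reverse) = p :: pre'.reverse := by simp
      have e2 : ((pre' ++ [p] ++ [c]).reverse) = c :: p :: pre'.reverse := by simp
      rw [e1, e2]
      simp only [List.foldl_cons]
      have e3 : pvStep2B (pvStep2B [] c) p = p :: [c] := by
        simp only [pvStep2B]
        rw [if_neg hone]
      rw [e3]
      rw [pvFoldTail pre'.reverse p [c]]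
      have e4 : pvStep2B [] p = [p] := rfl
      rw [e4, List.append_assoc]
      rfl

lemma pvP2 (l : List String) (h : ∀ x ∈ l, x ≠ pvSent) :
    ((PySem.List.pyRange ((l.length : Int) - 1) 0 (-1)).foldl pvStep2 l).filter (fun x => x != pvSent)
      = (l.reverse).foldl pvStep2B [] := by
  rcases l.eq_nil_or_concat with rfl | ⟨pre', c, rfl⟩
  · rw [PySem.List.pyRange_neg_one_eq_nil (by norm_num)]
    rfl
  simp only [List.concat_eq_append] at h ⊢
  have hcast : (((pre' ++ [c]).length : Int)) - 1 = (pre'.length : Int) := by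
    simp [List.length_append]
  rw [hcast]
  have := pvP2a pre'.length pre' c [] (h c (by simp))
    (fun x hx => h x (List.mem_append_left _ hx)) rfl
  simpa using this

-- ===== bridge between B's fused backward scan and the two-stage reference pipeline =====

-- a merge head starts with '* ' while an absorbed line never does, so merge pairs never chain
lemma pvMC_not_left (x a h : String) (hx : pvMergeCond x a = true) : pvMergeCond h x = false := by
  simp only [pvMergeCond, Bool.and_eq_true] at hx
  simp only [pvMergeCond, hx.1.1.1, Bool.not_true, Bool.and_false, Bool.false_and]

-- a merged '* ' line is never plain
lemma pvPlain_merge_false (h y : String) (hs : PySem.Str.startswith h "* " = true) :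
    pvPlain (h ++ " " ++ y) = false := by
  have hsl : PySem.Str.slice (h ++ " " ++ y) none (some 2) = "* " := by
    simp [PySem.Chars.startswith_iff] at hs
    obtain ⟨r, hr⟩ := hs
    rw [← String.toList_inj]
    simp [PySem.Str.slice, ← hr]
    rw [show (2:Int) = ((2:Nat):Int) by norm_num, PySem.List.slice_to_natCast]
    simp
  simp [pvPlain, hsl]

lemma pvStep2B_not_plain (out : List String) (m : String) (hm : pvPlain m = false) :
    pvStep2B out m = m :: out := by
  cases out with
  | nil => rfl
  | cons h t => simp [pvStep2B, hm]

-- appending one unabsorbed line to pass 1's input appends it to its output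
lemma pvGo_snoc1 : ∀ (t : List String) (x a : String),
    pvMergeCond (t.getLastD x) a = false →
    pvPass1Go x (t ++ [a]) = pvPass1Go x t ++ [a] := by
  intro t
  generalize hn : t.length = n
  induction n using Nat.strong_induction_on generalizing t with
  | _ n ih =>
  cases t with
  | nil =>
    intro x a h
    simp only [List.getLastD_nil] at h
    simp [pvPass1Go, h]
  | cons y t' =>
    intro x a h
    rw [List.getLastD_cons] at h
    by_cases hc : pvMergeCond x y = true
    · rw [List.cons_append, pvGo_merge x y _ hc, pvGo_merge x y _ hc]
      congr 1
      cases t' with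
      | nil => simp [pvPass1B, pvPass1Go]
      | cons z t'' =>
        rw [show (z :: t'') ++ [a] = z :: (t'' ++ [a]) by simp]
        simp only [pvPass1B]
        rw [List.getLastD_cons] at h
        exact ih t''.length (by simp only [List.length_cons] at hn; omega) t'' rfl z a h
    · rw [List.cons_append, pvGo_nomerge x y _ hc, pvGo_nomerge x y _ hc, List.cons_append]
      congr 1
      exact ih t'.length (by simp only [List.length_cons] at hn; omega) t' rfl y a h

-- appending a merging pair to pass 1's input appends the merged line to its output
lemma pvGo_snoc2 : ∀ (t : List String) (h x a : String), pvMergeCond x a = true →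
    pvPass1Go h (t ++ [x, a]) = pvPass1Go h t ++ [x ++ " " ++ a] := by
  intro t
  generalize hn : t.length = n
  induction n using Nat.strong_induction_on generalizing t with
  | _ n ih =>
  cases t with
  | nil =>
    intro h x a hm
    have hnx : ¬ pvMergeCond h x = true := by simp [pvMC_not_left x a h hm]
    simp only [List.nil_append]
    rw [pvGo_nomerge h x _ hnx]
    simp [pvPass1Go, hm]
  | cons y t' =>
    intro h x a hm
    by_cases hc : pvMergeCond h y = true
    · rw [List.cons_append, pvGo_merge h y _ hc, pvGo_merge h y _ hc]
      congr 1
      cases t' with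
      | nil =>
        simp only [List.nil_append, pvPass1B]
        simp [pvPass1Go, hm]
      | cons z t'' =>
        rw [show (z :: t'') ++ [x, a] = z :: (t'' ++ [x, a]) by simp]
        simp only [pvPass1B]
        exact ih t''.length (by simp only [List.length_cons] at hn; omega) t'' rfl z x a hm
    · rw [List.cons_append, pvGo_nomerge h y _ hc, pvGo_nomerge h y _ hc, List.cons_append]
      congr 1
      exact ih t'.length (by simp only [List.length_cons] at hn; omega) t' rfl y x a hm

lemma pvP1B_snoc1 (xs : List String) (a : String)
    (h : ∀ w, xs.getLast? = some w → pvMergeCond w a = false) :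
    pvPass1B (xs ++ [a]) = pvPass1B xs ++ [a] := by
  cases xs with
  | nil => rfl
  | cons x t =>
    simp only [List.cons_append, pvPass1B]
    exact pvGo_snoc1 t x a (h _ (by rw [List.getLast?_cons]; simp [List.getLastD_eq_getLast?]))

lemma pvP1B_snoc2 (xs : List String) (x a : String) (hm : pvMergeCond x a = true) :
    pvPass1B (xs ++ [x, a]) = pvPass1B xs ++ [x ++ " " ++ a] := by
  cases xs with
  | nil =>
    simp only [List.nil_append, pvPass1B]
    simp [pvPass1Go, hm]
  | cons h t =>
    simp only [List.cons_append, pvPass1B]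
    exact pvGo_snoc2 t h x a hm

-- B's fused backward scan over lines[0:i] equals pass 1 followed by the pass-2 fold
lemma pvBridge (l : List String) : ∀ (i : Nat), i ≤ l.length → ∀ out,
    pvFusedGo l i out = ((pvPass1B (l.take i)).reverse).foldl pvStep2B out := by
  intro i
  induction i using Nat.strong_induction_on with
  | _ i ih =>
  match i with
  | 0 => intro _ out; simp [pvFusedGo, pvPass1B]
  | 1 =>
    intro hle out
    have h0 : 0 < l.length := by omega
    have htk : l.take 1 = [l.getD 0 ""] := by
      rw [show (1 : Nat) = 0 + 1 by rfl, List.take_add_one, List.getElem?_eq_getElem h0,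
        List.getD_eq_getElem l "" h0]
      rfl
    rw [pvFusedGo, htk]
    rfl
  | (j+2) =>
    intro hle out
    have hj1 : j + 1 < l.length := by omega
    have hj : j < l.length := by omega
    have htk : l.take (j+2) = l.take (j+1) ++ [l.getD (j+1) ""] := by
      rw [show j + 2 = (j+1) + 1 by rfl, List.take_add_one, List.getElem?_eq_getElem hj1,
        List.getD_eq_getElem l "" hj1]
      rfl
    have htk2 : l.take (j+1) = l.take j ++ [l.getD j ""] := by
      rw [List.take_add_one, List.getElem?_eq_getElem hj, List.getD_eq_getElem l "" hj]
      rfl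
    rw [pvFusedGo]
    by_cases hc : pvMergeCond (l.getD j "") (l.getD (j+1) "") = true
    · simp only [hc, if_true]
      rw [ih j (by omega) (by omega), htk, htk2]
      rw [show (l.take j ++ [l.getD j ""]) ++ [l.getD (j+1) ""]
            = l.take j ++ [l.getD j "", l.getD (j+1) ""] by simp]
      rw [pvP1B_snoc2 _ _ _ hc]
      have hpl : pvPlain (l.getD j "" ++ " " ++ l.getD (j+1) "") = false := by
        apply pvPlain_merge_false
        simp only [pvMergeCond, Bool.and_eq_true] at hc
        exact hc.1.1.1
      rw [List.reverse_append]
      simp only [List.reverse_cons, List.reverse_nil, List.nil_append, List.singleton_append,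
        List.foldl_cons]
      rw [pvStep2B_not_plain out _ hpl]
    · simp only [hc, if_false, Bool.false_eq_true]
      have hlast : ∀ w, (l.take (j+1)).getLast? = some w → pvMergeCond w (l.getD (j+1) "") = false := by
        intro w hw
        rw [htk2, List.getLast?_concat] at hw
        simp only [Option.some.injEq] at hw
        subst hw
        exact Bool.not_eq_true _ ▸ eq_false_of_ne_true hc
      rw [ih (j+1) (by omega) (by omega), htk, pvP1B_snoc1 _ _ hlast]
      rw [List.reverse_append]
      simp

-- character-count measure: every line's length plus one newline slot; both passes of B preserve it,
-- A's filter only ever removes unabsorbed sentinel lines, so inside D_ the outputs must differ in length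
def pvLen (s : String) : Nat := s.toList.length
def pvMu (l : List String) : Nat := (l.map pvLen).sum + l.length

lemma pvLen_glue (x y : String) : pvLen (x ++ " " ++ y) = pvLen x + pvLen y + 1 := by
  simp [pvLen]; omega

lemma pvMu_join (m : List String) (hm : m ≠ []) :
    (PySem.Str.join "\n" m).toList.length + 1 = pvMu m := by
  induction m with
  | nil => exact absurd rfl hm
  | cons a t ih =>
    cases t with
    | nil => simp [PySem.Str.join, PySem.Chars.join_singleton, pvMu, pvLen]
    | cons b t' =>
      have hbt : (b :: t') ≠ [] := by simp
      have hj : (PySem.Str.join "\n" (a :: b :: t')).toList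
          = a.toList ++ "\n".toList ++ (PySem.Str.join "\n" (b :: t')).toList := by
        simp [PySem.Str.join, List.map_cons, PySem.Chars.join_cons_cons]
      have := ih hbt
      rw [hj] at *
      simp only [List.length_append] at *
      simp [pvMu, pvLen] at this ⊢
      omega

lemma pvMu_go (t : List String) (x : String) :
    pvMu (pvPass1Go x t) = pvLen x + 1 + pvMu t := by
  generalize hn : t.length = n
  induction n using Nat.strong_induction_on generalizing t x with
  | _ n ih =>
  cases t with
  | nil => simp [pvPass1Go, pvMu]
  | cons y t' =>
    by_cases hc : pvMergeCond x y = true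
    · cases t' with
      | nil => simp [pvPass1Go, hc, pvMu, pvLen_glue]; omega
      | cons z t'' =>
        have : pvPass1Go x (y :: z :: t'') = (x ++ " " ++ y) :: pvPass1Go z t'' := by
          simp [pvPass1Go, hc]
        rw [this]
        have hr := ih t''.length (by simp only [List.length_cons] at hn; omega) t'' z rfl
        simp [pvMu, pvLen_glue] at hr ⊢
        omega
    · rw [pvGo_nomerge x y t' hc]
      have hr := ih t'.length (by simp only [List.length_cons] at hn; omega) t' y rfl
      simp [pvMu] at hr ⊢
      omega

lemma pvMu_pass1B (l : List String) : pvMu (pvPass1B l) = pvMu l := by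
  cases l with
  | nil => rfl
  | cons x t =>
    rw [show pvPass1B (x :: t) = pvPass1Go x t from rfl, pvMu_go]
    simp [pvMu]
    omega

lemma pvMu_step2B (acc : List String) (s : String) :
    pvMu (pvStep2B acc s) = pvMu acc + pvLen s + 1 := by
  cases acc with
  | nil => simp [pvStep2B, pvMu]
  | cons h t =>
    by_cases hc : (pvPlain s && pvPlain h) = true
    · simp only [pvStep2B]
      rw [if_pos hc]
      simp [pvMu, pvLen_glue]
      omega
    · simp only [pvStep2B]
      rw [if_neg hc]
      simp [pvMu]
      omega

lemma pvMu_foldB (xs acc : List String) :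
    pvMu (xs.foldl pvStep2B acc) = pvMu acc + pvMu xs := by
  induction xs generalizing acc with
  | nil => simp [pvMu]
  | cons x xs ih =>
    rw [List.foldl_cons, ih, pvMu_step2B]
    simp [pvMu]
    omega

lemma pvMu_gB (m : List String) : pvMu (m.reverse.foldl pvStep2B []) = pvMu m := by
  rw [pvMu_foldB]
  simp [pvMu]

lemma pvMuFA (l : List String) :
    pvMu ((pvFA false l).filter (fun x => x != pvSent)) ≤ pvMu l ∧
      (pvDL l → pvMu ((pvFA false l).filter (fun x => x != pvSent)) < pvMu l) := by
  generalize hn : l.length = n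
  induction n using Nat.strong_induction_on generalizing l with
  | _ n ih =>
  cases l with
  | nil =>
    refine ⟨by simp [pvFA, pvMu], ?_⟩
    intro hd
    rcases hd with hh | ⟨p, hp, _⟩
    · simp at hh
    · simp at hp
  | cons x t =>
    cases t with
    | nil =>
      rw [show pvFA false [x] = [x] from rfl]
      by_cases hx : x = pvSent
      · subst hx
        refine ⟨by simp [pvMu], by intro _; simp [pvMu]⟩
      · have h1 : (x != pvSent) = true := by simp [hx]
        refine ⟨by simp [h1], ?_⟩
        intro hd
        rcases hd with hh | ⟨p, hp, _⟩
        · simp at hh; exact absurd hh hx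
        · simp at hp
    | cons y t' =>
      by_cases hc : pvMergeCond x y = true
      · rw [pvFA_cons2, if_pos hc, pvFA_true]
        have hsw : PySem.Str.startswith x "* " = true := by
          simp only [pvMergeCond, Bool.and_eq_true] at hc
          exact hc.1.1.1
        have h1 : ((x ++ " " ++ y) != pvSent) = true := by simp [pvGlue_ne_sent x y]
        have h2 : (pvSent != pvSent) = false := by simp
        simp only [List.filter_cons, h1, h2, if_true]
        have hdl : pvDL (x :: y :: t') → pvDL t' := by
          intro hd
          rcases hd with hh | ⟨p, hp, hq⟩
          · simp only [List.head?_cons, Option.some.injEq] at hh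
            rw [hh] at hsw
            rw [pvSw_sent.1] at hsw
            exact absurd hsw (by simp)
          · simp only [List.tail_cons, List.zip_cons_cons, List.mem_cons] at hp
            rcases hp with rfl | hp
            · rw [hq.2] at hsw
              exact absurd hsw (by simp)
            · cases t' with
              | nil => simp at hp
              | cons z t'' =>
                simp only [List.zip_cons_cons, List.mem_cons] at hp
                rcases hp with rfl | hp
                · left
                  simp only [List.head?_cons, Option.some.injEq]
                  exact hq.1
                · right
                  exact ⟨p, by simpa using hp, hq⟩
        have hr := ih t'.length (by simp only [List.length_cons] at hn; omega) t' rfl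
        constructor
        · simp [pvMu, pvLen_glue] at hr ⊢
          omega
        · intro hd
          have := hr.2 (hdl hd)
          simp [pvMu, pvLen_glue] at this ⊢
          omega
      · rw [pvFA_cons2, if_neg hc]
        have hr := ih (y :: t').length (by simp only [List.length_cons] at hn ⊢; omega) (y :: t') rfl
        have hdl : pvDL (x :: y :: t') → x ≠ pvSent → pvDL (y :: t') := by
          intro hd hx
          rcases hd with hh | ⟨p, hp, hq⟩
          · simp only [List.head?_cons, Option.some.injEq] at hh
            exact absurd hh hx
          · simp only [List.tail_cons, List.zip_cons_cons, List.mem_cons] at hp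
            rcases hp with rfl | hp
            · left
              simp only [List.head?_cons, Option.some.injEq]
              exact hq.1
            · right; exact ⟨p, by simpa using hp, hq⟩
        by_cases hx : x = pvSent
        · subst hx
          have h1 : (pvSent != pvSent) = false := by simp
          simp only [List.filter_cons, h1]
          constructor
          · have := hr.1
            simp [pvMu] at this ⊢
            omega
          · intro _
            have := hr.1
            simp [pvMu] at this ⊢
            omega
        · have h1 : (x != pvSent) = true := by simp [hx]
          simp only [List.filter_cons, h1, if_true]
          constructor
          · have := hr.1
            simp [pvMu] at this ⊢
            omega
          · intro hd
            have := hr.2 (hdl hd hx)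
            simp [pvMu] at this ⊢
            omega

-- ===== VERDICT (by name: the statement is the Claim_ definition above) =====
theorem block_2_sanitized_block_spec : Claim_unchanged_block_2_sanitized_block := by
  intro block _
  unfold Spec_block_2_sanitized_block
  intro hND
  simp only [block_2_sanitized_block, block_2_sanitized_block_alt]
  set l := (PySem.Str.split? block "\n").getD [] with hl
  have hND' : ¬ pvDL l := fun hd => hND hd
  have h1 : ((List.range l.length).foldl (pvStep1 l.length) (l, false)).1 = pvFA false l := by
    have := pvP1a l [] false l.length (by simp)
    simpa [List.range_eq_range'] using this
  rw [h1, pvP1b l hND']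
  have hmem : ∀ x ∈ pvPass1B l, x ≠ pvSent := by
    rw [← pvP1b l hND']
    intro x hx
    have := List.of_mem_filter hx
    simpa using this
  rw [pvP2 (pvPass1B l) hmem]
  rw [pvBridge l l.length le_rfl [], List.take_length]

theorem block_2_sanitized_block_changed : Claim_changed_block_2_sanitized_block := by
  unfold Claim_changed_block_2_sanitized_block; decide

theorem block_2_sanitized_block_tight : Claim_exact_block_2_sanitized_block := by
  unfold Claim_exact_block_2_sanitized_block
  intro block _ hD heq
  simp only [block_2_sanitized_block, block_2_sanitized_block_alt] at heq
  set l := (PySem.Str.split? block "\n").getD [] with hl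
  rw [pvBridge l l.length le_rfl [], List.take_length] at heq
  have hDL : pvDL l := hD
  have hsent : pvSent ∈ l := by
    rcases hDL with hh | ⟨p, hp, hq⟩
    · exact List.mem_of_mem_head? hh
    · have := (List.of_mem_zip hp).2
      rw [hq.1] at this
      exact List.mem_of_mem_tail this
  have hmul : 24 ≤ pvMu l := by
    have h23 : pvLen pvSent = 23 := by decide
    have hle : pvLen pvSent ≤ (l.map pvLen).sum :=
      List.single_le_sum (by intro x _; exact Nat.zero_le _) _ (List.mem_map_of_mem hsent)
    have hlen1 : 1 ≤ l.length := List.length_pos_iff.mpr (List.ne_nil_of_mem hsent)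
    simp only [pvMu]
    omega
  have h1 : ((List.range l.length).foldl (pvStep1 l.length) (l, false)).1 = pvFA false l := by
    have := pvP1a l [] false l.length (by simp)
    simpa [List.range_eq_range'] using this
  rw [h1] at heq
  set X := (pvFA false l).filter (fun x => x != pvSent) with hX
  have hmem : ∀ x ∈ X, x ≠ pvSent := by
    intro x hx
    simpa using List.of_mem_filter hx
  rw [pvP2 X hmem] at heq
  have hmuX : pvMu X < pvMu l := (pvMuFA l).2 hDL
  have hmuA : pvMu (X.reverse.foldl pvStep2B []) = pvMu X := pvMu_gB X
  have hmuB : pvMu ((pvPass1B l).reverse.foldl pvStep2B []) = pvMu (pvPass1B l) := pvMu_gB _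
  have hBne : ((pvPass1B l).reverse.foldl pvStep2B []) ≠ [] := by
    intro h0
    rw [h0, pvMu_pass1B] at hmuB
    have hz : pvMu ([] : List String) = 0 := rfl
    rw [hz] at hmuB
    omega
  have hBlen : (PySem.Str.join "\n" ((pvPass1B l).reverse.foldl pvStep2B [])).toList.length + 1
      = pvMu l := by
    rw [pvMu_join _ hBne, hmuB, pvMu_pass1B]
  have hlen := congrArg (fun s => s.toList.length) heq
  simp only at hlen
  by_cases hAne : (X.reverse.foldl pvStep2B []) = []
  · rw [hAne] at hlen
    have h0 : (PySem.Str.join "\n" ([] : List String)).toList.length = 0 := rfl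
    rw [h0] at hlen
    omega
  · have hAlen : (PySem.Str.join "\n" (X.reverse.foldl pvStep2B [])).toList.length + 1
        = pvMu X := by
      rw [pvMu_join _ hAne, hmuA]
    omega
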